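-- pv_equiv track=rewrite | github.com/pypi-data/pypi-mirror-313 | packages/blackbirdCoOp/blackbirdcoop-0.1.9.tar.gz/blackbirdcoop-0.1.9/src/blackbirdcoop/stealthParser.py | replace_letters
-- ===== SOURCE A (Python) =====
-- def replace_letters(input_str, replacements_dict):
--
--     """Find all positions and possible replacements"""
--
--     all_str = []
--     positions = []
--     for i, char in enumerate(input_str):
--         if char in replacements_dict:
--             positions.append((i, replacements_dict[char]))
--
--     def gen_combos(input_str, positions, index=0):
--
--         """Generate all combinations by replacing the characters"""
--
--         if index >= len(positions):
--             all_str.append("".join(input_str))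
--             return
--
--         pos, replacements = positions[index]
--         for replacement in replacements:
--             new_str = list(input_str)
--             new_str[pos] = replacement
--             gen_combos(new_str, positions, index + 1)
--
--     gen_combos(list(input_str), positions)
--
--     return all_str
-- ===== SOURCE B (Python) =====
-- def replace_letters(input_str, replacements_dict):
--     """Find all positions and possible replacements"""
--     positions = []
--     for i, char in enumerate(input_str):
--         if char in replacements_dict:
--             positions.append((i, replacements_dict[char]))
--
--     # Iterative Cartesian product (breadth-first), leftmost position varies slowest.
--     combos = [()]
--     for _, replacements in positions:
--         combos = [combo + (r,) for combo in combos for r in replacements]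
--
--     all_str = []
--     for combo in combos:
--         chars = list(input_str)
--         for (pos, _), rep in zip(positions, combo):
--             chars[pos] = rep
--         all_str.append("".join(chars))
--     return all_str
-- ===== Notes on version B (the rewrite author's own statement) =====
-- stated objective: alternative
-- what changed: A generates the strings by depth-first recursion over the positions, mutating one character per call and appending at the leaves; B builds the full set of replacement tuples iteratively (a breadth-first Cartesian product, no recursion) and then materialises each string in a single pass over the tuple.
import Mathlib
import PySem

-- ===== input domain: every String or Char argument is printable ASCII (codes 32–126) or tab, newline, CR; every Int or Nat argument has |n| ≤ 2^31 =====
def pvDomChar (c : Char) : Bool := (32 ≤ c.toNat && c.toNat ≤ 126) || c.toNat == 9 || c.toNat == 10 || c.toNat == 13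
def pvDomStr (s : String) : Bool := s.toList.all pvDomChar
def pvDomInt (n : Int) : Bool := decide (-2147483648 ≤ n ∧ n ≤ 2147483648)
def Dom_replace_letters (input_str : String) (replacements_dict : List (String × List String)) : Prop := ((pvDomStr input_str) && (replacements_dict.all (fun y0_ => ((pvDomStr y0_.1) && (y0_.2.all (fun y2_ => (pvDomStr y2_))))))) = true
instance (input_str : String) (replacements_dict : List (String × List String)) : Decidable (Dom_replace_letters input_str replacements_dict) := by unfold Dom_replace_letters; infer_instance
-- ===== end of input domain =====

-- B replaces A's depth-first recursion by an iterative breadth-first Cartesian product of the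
-- replacement tuples followed by a single materialisation pass (objective: alternative, same cost).

-- Shared by both ports (both Pythons build `positions` with the same scan):
-- the `(i, replacements_dict[char])` pairs for the chars of the string found in the dict
-- (dict lookup on an association list = first match, via List.lookup).
def positionsAux (i : Nat) (cs : List Char) (d : List (String × List String)) : List (Nat × List String) :=
  match cs with
  | [] => []
  | c :: rest =>
    match List.lookup (String.ofList [c]) d with
    | some reps => (i, reps) :: positionsAux (i + 1) rest d
    | none => positionsAux (i + 1) rest d

-- ===== PORT A =====
-- A's recursive gen_combos: the inner `for replacement in replacements` loop is the foldl,
-- all_str is the accumulator `acc` threaded through the recursion.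
def genCombosA (inp : List String) (positions : List (Nat × List String)) (acc : List String) : List String :=
  match positions with
  | [] => acc ++ [PySem.Str.join "" inp]
  | (pos, reps) :: rest => reps.foldl (fun a r => genCombosA (inp.set pos r) rest a) acc

def replace_letters (input_str : String) (replacements_dict : List (String × List String)) : List String :=
  let positions := positionsAux 0 input_str.toList replacements_dict
  genCombosA (input_str.toList.map (fun c => String.ofList [c])) positions []

-- ===== PORT B =====
def replace_letters_alt (input_str : String) (replacements_dict : List (String × List String)) : List String :=
  let positions := positionsAux 0 input_str.toList replacements_dict
  -- combos = [()] ; for _, reps in positions: combos = [c + (r,) for c in combos for r in reps]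
  let combos := positions.foldl
    (fun combos pr => combos.flatMap (fun c => pr.2.map (fun r => c ++ [r]))) [[]]
  -- for combo in combos: chars = list(input_str); set chars[pos]; append "".join(chars)
  combos.map (fun combo =>
    PySem.Str.join ""
      ((positions.zip combo).foldl (fun chars p => chars.set p.1.1 p.2)
        (input_str.toList.map (fun c => String.ofList [c]))))

-- ===== PRECONDITION & SPEC =====
def Spec_replace_letters (input_str : String) (replacements_dict : List (String × List String)) (out : List String) : Prop := out = replace_letters_alt input_str replacements_dict
instance (input_str : String) (replacements_dict : List (String × List String)) (out : List String) : Decidable (Spec_replace_letters input_str replacements_dict out) := by unfold Spec_replace_letters; infer_instance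

-- ===== CLAIM (what is proved, stated in full; the proofs are below) =====
def Claim_equal_replace_letters : Prop := ∀ (input_str : String) (replacements_dict : List (String × List String)), Dom_replace_letters input_str replacements_dict → Spec_replace_letters input_str replacements_dict (replace_letters input_str replacements_dict)

-- ===== LEMMAS AND PROOFS =====

-- Mathematical Cartesian product of the replacement lists, head-first (leftmost varies slowest).
def prodF : List (Nat × List String) → List (List String)
  | [] => [[]]
  | (_, reps) :: rest => reps.flatMap (fun r => (prodF rest).map (fun c => r :: c))

-- B's per-combo materialisation pass, as a named function.
def applyC (inp : List String) (ps : List (Nat × List String)) (combo : List String) : List String :=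
  (ps.zip combo).foldl (fun chars p => chars.set p.1.1 p.2) inp

theorem applyC_cons (inp : List String) (pos : Nat) (reps : List String)
    (rest : List (Nat × List String)) (r : String) (c : List String) :
    applyC inp ((pos, reps) :: rest) (r :: c) = applyC (inp.set pos r) rest c := rfl

-- B's iterative product equals prodF (invariant of the breadth-first loop).
theorem combos_foldl_eq (ps : List (Nat × List String)) (K : List (List String)) :
    ps.foldl (fun combos pr => combos.flatMap (fun c => pr.2.map (fun r => c ++ [r]))) K
      = K.flatMap (fun c => (prodF ps).map (fun t => c ++ t)) := by
  induction ps generalizing K with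
  | nil => simp [prodF]
  | cons hd tl ih =>
    obtain ⟨pos, reps⟩ := hd
    rw [List.foldl_cons, ih]
    simp only [prodF, List.flatMap_assoc, List.map_flatMap, List.flatMap_map, List.map_map, Function.comp_def, List.append_assoc, List.singleton_append]

-- A's recursion equals: append, for each combo of prodF, the join of B's materialisation.
theorem genCombosA_eq (ps : List (Nat × List String)) (inp acc : List String) :
    genCombosA inp ps acc
      = acc ++ (prodF ps).map (fun c => PySem.Str.join "" (applyC inp ps c)) := by
  induction ps generalizing inp acc with
  | nil => simp [genCombosA, prodF, applyC]
  | cons hd tl ih =>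
    obtain ⟨pos, reps⟩ := hd
    show reps.foldl (fun a r => genCombosA (inp.set pos r) tl a) acc = _
    have hfun : (fun a r => genCombosA (inp.set pos r) tl a)
        = (fun a r => a ++ (prodF tl).map (fun c => PySem.Str.join "" (applyC (inp.set pos r) tl c))) := by
      funext a r; exact ih (inp.set pos r) a
    rw [hfun, PySem.List.foldl_append_eq_flatMap]
    simp only [prodF, List.map_flatMap, List.map_map, Function.comp_def, applyC_cons]

-- ===== VERDICT (by name: the statement is the Claim_ definition above) =====
theorem replace_letters_spec : Claim_equal_replace_letters := by
  intro input_str replacements_dict _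
  unfold Spec_replace_letters
  simp only [replace_letters, replace_letters_alt, genCombosA_eq, combos_foldl_eq]
  simp [applyC]
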